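-- pv_equiv track=rewrite | github.com/Keinazj/FOCP-project-threes-game- | phase 2 project threes focp.py | add_random_right
-- ===== SOURCE A (Python) =====
-- def add_random_right(board,d,mod):
--
--     tedad0 = -1
--     i = 0
--     for j in range(len(board)):
--         if board[j][i] == '0':
--             tedad0+=1
--             if tedad0 == mod:
--                 board[j][0] = d
--                 break
--
--     return board
-- ===== SOURCE B (Python) =====
-- def add_random_right(board, d, mod):
--     zeros = [j for j in range(len(board)) if board[j][0] == '0']
--     if 0 <= mod < len(zeros):
--         board[zeros[mod]][0] = d
--     return board
-- ===== Notes on version B (the rewrite author's own statement) =====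
-- stated objective: simpler
-- what changed: Replaces A's interleaved count-and-break scan over rows with a two-phase decomposition: first build the index list of rows whose column 0 is '0', then do one guarded assignment at zeros[mod].
-- outside the precondition, e.g. on add_random_right([['0'], []], '1', 0): A returns [['1'], []], B raises IndexError
import Mathlib
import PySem

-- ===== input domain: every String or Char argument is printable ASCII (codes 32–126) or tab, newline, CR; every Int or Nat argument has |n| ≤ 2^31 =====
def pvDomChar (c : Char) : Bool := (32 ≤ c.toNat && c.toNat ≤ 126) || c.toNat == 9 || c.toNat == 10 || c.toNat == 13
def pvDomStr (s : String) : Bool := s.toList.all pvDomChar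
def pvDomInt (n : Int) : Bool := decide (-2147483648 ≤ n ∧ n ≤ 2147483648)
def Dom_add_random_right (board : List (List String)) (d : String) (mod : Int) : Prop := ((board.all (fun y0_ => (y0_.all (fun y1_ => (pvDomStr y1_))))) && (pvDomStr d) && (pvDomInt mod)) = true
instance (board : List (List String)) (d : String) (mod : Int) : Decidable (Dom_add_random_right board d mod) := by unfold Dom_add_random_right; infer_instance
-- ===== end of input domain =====

-- B replaces A's interleaved count-and-break scan with a two-phase build-index-then-select
-- decomposition (objective: simpler). Both Pythons mutate `board` in place the same way; the
-- equivalence proved here is about the returned value.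

-- ===== PORT A =====
-- the for-loop with `break`: j is the loop index, tedad0 the running zero count;
-- the `none` branch (empty row: Python raises IndexError) is excluded by Pre_ below.
def aLoop (d : String) (mod : Int) (b : List (List String)) (tedad0 : Int) (j : Nat) : List (List String) :=
  if _h : j < b.length then
    match PySem.List.pyGet? (b.getD j []) 0 with
    | none => b
    | some c =>
      if c = "0" then
        if tedad0 + 1 = mod then b.set j ((b.getD j []).set 0 d)
        else aLoop d mod b (tedad0 + 1) (j + 1)
      else aLoop d mod b tedad0 (j + 1)
  else b
termination_by b.length - j

def add_random_right (board : List (List String)) (d : String) (mod : Int) : List (List String) :=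
  aLoop d mod board (-1) 0

-- ===== PORT B =====
def add_random_right_alt (board : List (List String)) (d : String) (mod : Int) : List (List String) :=
  let zeros := (List.range board.length).filter (fun j => (board.getD j []).headD "" = "0")
  if 0 ≤ mod ∧ mod < (zeros.length : Int) then
    let k := zeros.getD mod.toNat 0
    board.set k ((board.getD k []).set 0 d)
  else board

-- ===== PRECONDITION & SPEC =====
-- Pre_ excludes boards containing an empty row: Python A raises IndexError on board[j][0] when it
-- reaches such a row, and returns only when the break fires before reaching it (an accident of the
-- break position); B raises there too while building the index list.
def Pre_add_random_right (board : List (List String)) (d : String) (mod : Int) : Prop :=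
  ∀ row ∈ board, row ≠ []
instance (board : List (List String)) (d : String) (mod : Int) : Decidable (Pre_add_random_right board d mod) := by unfold Pre_add_random_right; infer_instance

def pvWitness_add_random_right : List (List String) × String × Int := ([["0"], ["1"], ["0"]], "3", 1)

def Spec_add_random_right (board : List (List String)) (d : String) (mod : Int) (out : List (List String)) : Prop := out = add_random_right_alt board d mod
instance (board : List (List String)) (d : String) (mod : Int) (out : List (List String)) : Decidable (Spec_add_random_right board d mod out) := by unfold Spec_add_random_right; infer_instance

-- ===== CLAIM (what is proved, stated in full; the proofs are below) =====
def Claim_equal_add_random_right : Prop := ∀ (board : List (List String)) (d : String) (mod : Int), Dom_add_random_right board d mod → Pre_add_random_right board d mod → Spec_add_random_right board d mod (add_random_right board d mod)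

-- ===== LEMMAS AND PROOFS =====

-- the loop from index j, with zero count tedad0, equals a guarded lookup into the
-- filtered index list of the remaining rows
lemma aLoop_eq (d : String) (mod : Int) (b : List (List String))
    (hb : ∀ row ∈ b, row ≠ []) :
    ∀ n j t, n = b.length - j →
    aLoop d mod b t j =
      (let zs := (List.range' j n).filter (fun i => (b.getD i []).headD "" = "0")
       if 0 ≤ mod - (t + 1) ∧ mod - (t + 1) < (zs.length : Int) then
         let k := zs.getD (mod - (t + 1)).toNat 0
         b.set k ((b.getD k []).set 0 d)
       else b) := by
  intro n
  induction n with
  | zero =>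
    intro j t h
    rw [aLoop]
    simp only [List.range'_zero, List.filter_nil, List.length_nil]
    have hj : ¬ j < b.length := by omega
    simp only [hj, dite_false]
    split_ifs with hc
    · omega
    · rfl
  | succ n ih =>
    intro j t h
    have hj : j < b.length := by omega
    have hrow : b.getD j [] ∈ b := by
      rw [List.getD_eq_getElem?_getD, List.getElem?_eq_getElem hj]
      exact List.getElem_mem hj
    obtain ⟨c, cs, hcons⟩ : ∃ c cs, b.getD j [] = c :: cs := by
      cases hcons : b.getD j [] with
      | nil => exact absurd hcons (hb _ hrow)
      | cons c cs => exact ⟨c, cs, rfl⟩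
    have hhead : (b.getD j []).headD "" = c := by rw [hcons]; rfl
    have hget : PySem.List.pyGet? (b.getD j []) 0 = some c := by
      rw [hcons]; simp [PySem.List.pyGet?, PySem.List.pyIdx?]
    rw [aLoop]
    simp only [hj, dite_true, hget]
    simp only [List.range'_succ, List.filter_cons, hhead]
    by_cases hc : c = "0"
    · simp only [hc, if_true, decide_true]
      by_cases hm : t + 1 = mod
      · rw [if_pos hm]
        have h0 : mod - (t + 1) = 0 := by omega
        rw [h0]
        rw [if_pos ⟨le_refl 0, by simp [List.length_cons]⟩]
        simp
      · rw [if_neg hm, ih (j + 1) (t + 1) (by omega)]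
        simp only [List.length_cons]
        split_ifs with h1 h2 h2
        · have ht : (mod - (t + 1)).toNat = (mod - (t + 1 + 1)).toNat + 1 := by omega
          rw [ht, List.getD_cons_succ]
        · exfalso; push_cast at h1 h2; omega
        · exfalso; push_cast at h1 h2; omega
        · rfl
    · simp only [hc, decide_false, Bool.false_eq_true, if_false]
      rw [ih (j + 1) t (by omega)]

-- ===== VERDICT (by name: the statement is the Claim_ definition above) =====
theorem add_random_right_spec : Claim_equal_add_random_right := by
  intro board d mod _hdom hpre
  unfold Spec_add_random_right add_random_right add_random_right_alt
  rw [aLoop_eq d mod board hpre board.length 0 (-1) (by omega)]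
  simp [List.range_eq_range']
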